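-- pv_equiv track=rewrite | github.com/JoyfulRusty/rlcards-rs | lq_rlcard_new-develop/lq_rlcard/rlcards/games/mahjong/policy.py | calc_gap_cards
-- ===== SOURCE A (Python) =====
-- def calc_gap_cards(tmp_cards):
-- 	""" 计算间隔的两个数 """
-- 	gap_cards = []
-- 	for i in range(len(tmp_cards) - 1):
-- 		if tmp_cards[i] - tmp_cards[i + 1] == -2:
-- 			gap_cards.append(tmp_cards[i])
-- 			gap_cards.append(tmp_cards[i + 1])
-- 		continue
-- 	for card in gap_cards:
-- 		if card in tmp_cards:
-- 			tmp_cards.remove(card)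
--
-- 	return gap_cards
-- ===== SOURCE B (Python) =====
-- def calc_gap_cards(tmp_cards):
--     """ One pass over adjacent pairs collects the gap-2 cards; a budget dict
--     then rebuilds tmp_cards in a single pass (same in-place update as A). """
--     gap_cards = [x for a, b in zip(tmp_cards, tmp_cards[1:]) if b - a == 2
--                  for x in (a, b)]
--     budget = {}
--     for c in gap_cards:
--         budget[c] = budget.get(c, 0) + 1
--     kept = []
--     for c in tmp_cards:
--         if budget.get(c, 0) > 0:
--             budget[c] -= 1
--         else:
--             kept.append(c)
--     tmp_cards[:] = kept
--     return gap_cards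
-- ===== Notes on version B (the rewrite author's own statement) =====
-- stated objective: faster
-- what changed: B builds the gap list in one pass over zip(tmp_cards, tmp_cards[1:]) and replaces the per-card list.remove scans by a budget dict plus a single-pass rebuild of tmp_cards (same in-place mutation, same return value).
import Mathlib
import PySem

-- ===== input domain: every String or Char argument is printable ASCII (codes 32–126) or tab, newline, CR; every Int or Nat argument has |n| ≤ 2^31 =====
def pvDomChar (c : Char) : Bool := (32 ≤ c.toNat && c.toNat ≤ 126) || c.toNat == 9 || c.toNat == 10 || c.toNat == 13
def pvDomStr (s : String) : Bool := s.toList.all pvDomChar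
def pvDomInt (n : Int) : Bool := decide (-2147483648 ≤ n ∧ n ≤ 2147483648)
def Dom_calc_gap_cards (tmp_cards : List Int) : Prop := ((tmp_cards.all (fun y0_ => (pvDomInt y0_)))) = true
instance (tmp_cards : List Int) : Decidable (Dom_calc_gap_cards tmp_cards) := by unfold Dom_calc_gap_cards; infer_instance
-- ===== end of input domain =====

-- B replaces A's quadratic index-scan + repeated list.remove by one zip/filter pass for the
-- gap list and a budget-dict single-pass rebuild for the in-place update of tmp_cards; both
-- mutate tmp_cards identically, and the equivalence proved here is about the RETURN value.


-- ===== PORT A =====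
-- Literal transliteration of A's first loop (range over indices; xs[i] via pyGetD,
-- always in range here since 0 ≤ i < len-1).  A's second loop only mutates the
-- tmp_cards argument in place (a side effect outside the return value, see header).
def calc_gap_cards (tmp_cards : List Int) : List Int :=
  (PySem.List.pyRange 0 ((tmp_cards.length : Int) - 1) 1).foldl
    (fun gap_cards i =>
      if PySem.List.pyGetD tmp_cards i 0 - PySem.List.pyGetD tmp_cards (i + 1) 0 = -2 then
        gap_cards ++ [PySem.List.pyGetD tmp_cards i 0] ++ [PySem.List.pyGetD tmp_cards (i + 1) 0]
      else gap_cards) []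

-- ===== PORT B =====
-- B's gap list: zip(tmp_cards, tmp_cards[1:]) (tmp_cards[1:] = drop 1, exact),
-- filter the gap-2 pairs, flatten.  B's budget-dict rebuild only updates the
-- tmp_cards argument in place (same side effect as A, outside the return value).
def calc_gap_cards_alt (tmp_cards : List Int) : List Int :=
  ((tmp_cards.zip (tmp_cards.drop 1)).filter (fun p => p.2 - p.1 == 2)).flatMap
    (fun p => [p.1, p.2])

-- ===== PRECONDITION & SPEC =====
def Spec_calc_gap_cards (tmp_cards : List Int) (out : List Int) : Prop := out = calc_gap_cards_alt tmp_cards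
instance (tmp_cards : List Int) (out : List Int) : Decidable (Spec_calc_gap_cards tmp_cards out) := by unfold Spec_calc_gap_cards; infer_instance

-- ===== CLAIM (what is proved, stated in full; the proofs are below) =====
def Claim_equal_calc_gap_cards : Prop := ∀ (tmp_cards : List Int), Dom_calc_gap_cards tmp_cards → Spec_calc_gap_cards tmp_cards (calc_gap_cards tmp_cards)

-- ===== LEMMAS AND PROOFS =====

-- ===== VERDICT (by name: the statement is the Claim_ definition above) =====
-- flatMap over a filter = flatMap of the guarded function
lemma flatMap_filter_eq (l : List (Int × Int)) (p : Int × Int → Bool)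
    (f : Int × Int → List Int) :
    (l.filter p).flatMap f = l.flatMap (fun x => if p x then f x else []) := by
  induction l with
  | nil => rfl
  | cons a t ih => by_cases h : p a <;> simp [h, ih]

-- index-based adjacent-pair traversal = zip-based traversal, for any pair function
lemma range_pairs_eq_zip (F : Int → Int → List Int) (l : List Int) :
    (List.range (l.length - 1)).flatMap
      (fun k => F (l.getD k 0) (l.getD (k + 1) 0)) =
    (l.zip (l.drop 1)).flatMap (fun p => F p.1 p.2) := by
  induction l with
  | nil => rfl
  | cons a t ih =>
    cases t with
    | nil => rfl
    | cons b u =>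
      have hlen : (a :: b :: u : List Int).length - 1 = (b :: u : List Int).length - 1 + 1 := by
        simp
      rw [hlen, List.range_succ_eq_map, List.flatMap_cons, List.flatMap_map]
      have : ∀ k : Nat,
          (fun k => F ((a :: b :: u).getD k 0) ((a :: b :: u).getD (k + 1) 0)) (k + 1)
          = F ((b :: u).getD k 0) ((b :: u).getD (k + 1) 0) := fun k => rfl
      simp only [this]
      rw [ih]
      rfl

theorem calc_gap_cards_spec : Claim_equal_calc_gap_cards := by
  intro l _
  show calc_gap_cards l = calc_gap_cards_alt l
  unfold calc_gap_cards calc_gap_cards_alt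
  have hstep : (fun (gap_cards : List Int) (i : Int) =>
      if PySem.List.pyGetD l i 0 - PySem.List.pyGetD l (i + 1) 0 = -2 then
        gap_cards ++ [PySem.List.pyGetD l i 0] ++ [PySem.List.pyGetD l (i + 1) 0]
      else gap_cards)
      = (fun gap_cards i => gap_cards ++
          (if PySem.List.pyGetD l (i + 1) 0 - PySem.List.pyGetD l i 0 == 2 then
            [PySem.List.pyGetD l i 0, PySem.List.pyGetD l (i + 1) 0] else [])) := by
    funext g i
    by_cases h : PySem.List.pyGetD l i 0 - PySem.List.pyGetD l (i + 1) 0 = -2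
    · have h2 : PySem.List.pyGetD l (i + 1) 0 - PySem.List.pyGetD l i 0 = 2 := by omega
      simp [h, h2]
    · have h2 : ¬ PySem.List.pyGetD l (i + 1) 0 - PySem.List.pyGetD l i 0 = 2 := by omega
      simp [h, h2]
  rw [hstep, PySem.List.foldl_append_eq_flatMap, List.nil_append,
      flatMap_filter_eq, PySem.List.pyRange_one, List.flatMap_map]
  have hto : ((l.length : Int) - 1 - 0).toNat = l.length - 1 := by omega
  rw [hto]
  simp only [zero_add,
    show ∀ k : Nat, ((k : Int) + 1) = ((k + 1 : Nat) : Int) from fun k => by push_cast; ring,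
    PySem.List.pyGetD_natCast]
  exact range_pairs_eq_zip (fun x y => if y - x == 2 then [x, y] else []) l
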